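-- pv_equiv track=rewrite | github.com/ZhiyuanW-2025/7806_Healthcare_AI_Product | app.py | choose_next_question_target
-- ===== SOURCE A (Python) =====
-- from typing import Any, Dict, List, Optional, Set, Tuple
--
-- def choose_next_question_target(gaps: List[str], last_target: str = "") -> str:
--     if not gaps:
--         return ""
--     priorities = [
--         "symptom duration",
--         "measured temperature",
--         "red-flag symptoms",
--         "current medications",
--         "allergy information",
--         "past medical history",
--         "age or pregnancy status",
--         "main symptom",
--     ]
--     for p in priorities:
--         if p in gaps and p != last_target:
--             return p
--     return gaps[0]
-- ===== SOURCE B (Python) =====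
-- def choose_next_question_target(gaps, last_target=""):
--     if not gaps:
--         return ""
--     priorities = [
--         "symptom duration",
--         "measured temperature",
--         "red-flag symptoms",
--         "current medications",
--         "allergy information",
--         "past medical history",
--         "age or pregnancy status",
--         "main symptom",
--     ]
--     rank = {name: i for i, name in enumerate(priorities)}
--     best = None  # (gap, rank) of the best-ranked eligible gap seen so far
--     for g in gaps:
--         r = rank.get(g)
--         if r is not None and g != last_target and (best is None or r < best[1]):
--             best = (g, r)
--     return best[0] if best is not None else gaps[0]
-- ===== Notes on version B (the rewrite author's own statement) =====
-- stated objective: alternative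
-- what changed: Inverts the traversal: instead of scanning the priority list and testing membership in gaps for each priority, B builds a rank index once and makes a single pass over gaps tracking the minimum-rank eligible gap.
import Mathlib
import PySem

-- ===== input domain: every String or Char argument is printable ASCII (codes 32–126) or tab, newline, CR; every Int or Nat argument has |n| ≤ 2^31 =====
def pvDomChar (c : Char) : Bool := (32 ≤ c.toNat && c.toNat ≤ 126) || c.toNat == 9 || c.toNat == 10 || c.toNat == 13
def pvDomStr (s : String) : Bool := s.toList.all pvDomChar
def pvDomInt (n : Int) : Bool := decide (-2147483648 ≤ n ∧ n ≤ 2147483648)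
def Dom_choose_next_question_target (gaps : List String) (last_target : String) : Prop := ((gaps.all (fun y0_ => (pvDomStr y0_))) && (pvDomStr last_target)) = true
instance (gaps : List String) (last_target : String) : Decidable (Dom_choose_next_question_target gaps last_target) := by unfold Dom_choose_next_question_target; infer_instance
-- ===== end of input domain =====

-- B replaces A's scan over the priority list (a membership test in gaps per priority) by a
-- rank index consulted in one pass over gaps (objective: alternative decomposition).

-- ===== PORT A =====
def pvPriorities : List String :=
  ["symptom duration", "measured temperature", "red-flag symptoms", "current medications",
   "allergy information", "past medical history", "age or pregnancy status", "main symptom"]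

-- the 'for p in priorities: if p in gaps and p != last_target: return p' loop
def pvFindA (gaps : List String) (last_target : String) : List String → Option String
  | [] => none
  | p :: rest => if p ∈ gaps ∧ p ≠ last_target then some p else pvFindA gaps last_target rest

def choose_next_question_target (gaps : List String) (last_target : String) : String :=
  match gaps with
  | [] => ""
  | g0 :: _ =>
    match pvFindA gaps last_target pvPriorities with
    | some p => p
    | none => g0

-- ===== PORT B =====
def pvPrioritiesB : List String :=
  ["symptom duration", "measured temperature", "red-flag symptoms", "current medications",
   "allergy information", "past medical history", "age or pregnancy status", "main symptom"]

-- rank = {name: i for i, name in enumerate(priorities)}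
def pvRank : PySem.Dict String Int :=
  (PySem.List.enumerate pvPrioritiesB).foldl (fun d iv => d.insert iv.2 iv.1) PySem.Dict.empty

-- body of the 'for g in gaps' loop: best is None or the pair (g, r)
def pvStep (last_target : String) (best : Option (String × Int)) (g : String) : Option (String × Int) :=
  match pvRank.get? g with
  | none => best
  | some r =>
    if g != last_target && (match best with | none => true | some (_, br) => decide (r < br))
    then some (g, r) else best

def choose_next_question_target_alt (gaps : List String) (last_target : String) : String :=
  match gaps with
  | [] => ""
  | g0 :: _ =>
    match gaps.foldl (pvStep last_target) none with
    | some (g, _) => g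
    | none => g0

-- ===== PRECONDITION & SPEC =====
def Spec_choose_next_question_target (gaps : List String) (last_target : String) (out : String) : Prop := out = choose_next_question_target_alt gaps last_target
instance (gaps : List String) (last_target : String) (out : String) : Decidable (Spec_choose_next_question_target gaps last_target out) := by unfold Spec_choose_next_question_target; infer_instance

-- ===== CLAIM (what is proved, stated in full; the proofs are below) =====
def Claim_equal_choose_next_question_target : Prop := ∀ (gaps : List String) (last_target : String), Dom_choose_next_question_target gaps last_target → Spec_choose_next_question_target gaps last_target (choose_next_question_target gaps last_target)

-- ===== LEMMAS AND PROOFS =====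

-- left-biased minimum-by-rank merge; pvStep is 'merge with one candidate'
def pvMerge : Option (String × Int) → Option (String × Int) → Option (String × Int)
  | none, b => b
  | some a, none => some a
  | some a, some b => if b.2 < a.2 then some b else some a

def pvCand (last_target g : String) : Option (String × Int) :=
  match pvRank.get? g with
  | none => none
  | some r => if g ≠ last_target then some (g, r) else none

theorem pvMerge_none_left (x : Option (String × Int)) : pvMerge none x = x := rfl

theorem pvRank_eq_mk : pvRank = PySem.Dict.mk
    [("symptom duration",0),("measured temperature",1),("red-flag symptoms",2),("current medications",3),
     ("allergy information",4),("past medical history",5),("age or pregnancy status",6),("main symptom",7)] := by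
  rfl

theorem pvRank_get_none (g : String) (e0 : g ≠ "symptom duration") (e1 : g ≠ "measured temperature") (e2 : g ≠ "red-flag symptoms") (e3 : g ≠ "current medications") (e4 : g ≠ "allergy information") (e5 : g ≠ "past medical history") (e6 : g ≠ "age or pregnancy status") (e7 : g ≠ "main symptom") :
    pvRank.get? g = none := by
  rw [pvRank_eq_mk]
  simp [Ne.symm e0, Ne.symm e1, Ne.symm e2, Ne.symm e3, Ne.symm e4, Ne.symm e5, Ne.symm e6, Ne.symm e7, PySem.Dict.get?]

theorem pvStep_eq_merge (last_target : String) (best : Option (String × Int)) (g : String) :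
    pvStep last_target best g = pvMerge best (pvCand last_target g) := by
  unfold pvStep pvCand
  cases hr : pvRank.get? g with
  | none => cases best <;> rfl
  | some r =>
    by_cases hl : g = last_target
    · subst hl; cases best <;> simp [pvMerge]
    · cases best with
      | none => simp [pvMerge, bne_iff_ne, hl]
      | some a =>
        simp only [bne_iff_ne, ne_eq, hl, not_false_eq_true, decide_true, Bool.true_and]
        by_cases hlt : r < a.2 <;> simp [hlt, hl, pvMerge]

theorem pvMerge_assoc (a b c : Option (String × Int)) :
    pvMerge (pvMerge a b) c = pvMerge a (pvMerge b c) := by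
  cases a with
  | none => rfl
  | some x =>
    cases b with
    | none => rfl
    | some y =>
      cases c with
      | none => simp only [pvMerge]; split_ifs with h <;> rfl
      | some z =>
        simp only [pvMerge]; split_ifs <;> simp only [pvMerge] <;> split_ifs <;>
          first | rfl | omega

def pvBig (last_target : String) : List String → Option (String × Int)
  | [] => none
  | g :: gs => pvMerge (pvCand last_target g) (pvBig last_target gs)

theorem pvFoldl_eq_big (last_target : String) (gaps : List String) :
    ∀ st, gaps.foldl (pvStep last_target) st = pvMerge st (pvBig last_target gaps) := by
  induction gaps with
  | nil => intro st; cases st <;> rfl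
  | cons g gs ih =>
    intro st
    simp only [List.foldl_cons, ih, pvStep_eq_merge, pvBig, pvMerge_assoc]

def pvExp8 (b0 b1 b2 b3 b4 b5 b6 b7 : Bool) : Option (String × Int) :=
  if b0 then some ("symptom duration", 0)
  else if b1 then some ("measured temperature", 1)
  else if b2 then some ("red-flag symptoms", 2)
  else if b3 then some ("current medications", 3)
  else if b4 then some ("allergy information", 4)
  else if b5 then some ("past medical history", 5)
  else if b6 then some ("age or pregnancy status", 6)
  else if b7 then some ("main symptom", 7)
  else none

-- eligibility flag of one priority
def pvE (p : String) (gaps : List String) (last_target : String) : Bool :=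
  decide (p ∈ gaps ∧ p ≠ last_target)

theorem pvE_cons_of_not (p g last_target : String) (gs : List String)
    (h : ¬(g = p ∧ g ≠ last_target)) :
    pvE p (g :: gs) last_target = pvE p gs last_target := by
  by_cases hg : g = p
  · subst hg
    have hlt : g = last_target := by tauto
    simp [pvE, hlt]
  · have hpg : ¬(p = g) := fun h' => hg h'.symm
    simp [pvE, List.mem_cons, hpg]

theorem pvM0 : ∀ (b0 b1 b2 b3 b4 b5 b6 b7 : Bool),
    pvMerge (some ("symptom duration", 0)) (pvExp8 b0 b1 b2 b3 b4 b5 b6 b7) = pvExp8 true b1 b2 b3 b4 b5 b6 b7 := by decide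

theorem pvM1 : ∀ (b0 b1 b2 b3 b4 b5 b6 b7 : Bool),
    pvMerge (some ("measured temperature", 1)) (pvExp8 b0 b1 b2 b3 b4 b5 b6 b7) = pvExp8 b0 true b2 b3 b4 b5 b6 b7 := by decide

theorem pvM2 : ∀ (b0 b1 b2 b3 b4 b5 b6 b7 : Bool),
    pvMerge (some ("red-flag symptoms", 2)) (pvExp8 b0 b1 b2 b3 b4 b5 b6 b7) = pvExp8 b0 b1 true b3 b4 b5 b6 b7 := by decide

theorem pvM3 : ∀ (b0 b1 b2 b3 b4 b5 b6 b7 : Bool),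
    pvMerge (some ("current medications", 3)) (pvExp8 b0 b1 b2 b3 b4 b5 b6 b7) = pvExp8 b0 b1 b2 true b4 b5 b6 b7 := by decide

theorem pvM4 : ∀ (b0 b1 b2 b3 b4 b5 b6 b7 : Bool),
    pvMerge (some ("allergy information", 4)) (pvExp8 b0 b1 b2 b3 b4 b5 b6 b7) = pvExp8 b0 b1 b2 b3 true b5 b6 b7 := by decide

theorem pvM5 : ∀ (b0 b1 b2 b3 b4 b5 b6 b7 : Bool),
    pvMerge (some ("past medical history", 5)) (pvExp8 b0 b1 b2 b3 b4 b5 b6 b7) = pvExp8 b0 b1 b2 b3 b4 true b6 b7 := by decide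

theorem pvM6 : ∀ (b0 b1 b2 b3 b4 b5 b6 b7 : Bool),
    pvMerge (some ("age or pregnancy status", 6)) (pvExp8 b0 b1 b2 b3 b4 b5 b6 b7) = pvExp8 b0 b1 b2 b3 b4 b5 true b7 := by decide

theorem pvM7 : ∀ (b0 b1 b2 b3 b4 b5 b6 b7 : Bool),
    pvMerge (some ("main symptom", 7)) (pvExp8 b0 b1 b2 b3 b4 b5 b6 b7) = pvExp8 b0 b1 b2 b3 b4 b5 b6 true := by decide

theorem pvBig_eq_exp (last_target : String) (gaps : List String) :
    pvBig last_target gaps =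
      pvExp8 (pvE "symptom duration" gaps last_target) (pvE "measured temperature" gaps last_target) (pvE "red-flag symptoms" gaps last_target) (pvE "current medications" gaps last_target) (pvE "allergy information" gaps last_target) (pvE "past medical history" gaps last_target) (pvE "age or pregnancy status" gaps last_target) (pvE "main symptom" gaps last_target) := by
  induction gaps with
  | nil => simp [pvBig, pvE, pvExp8]
  | cons g gs ih =>
    rw [pvBig, ih]
    by_cases h0 : g = "symptom duration" ∧ g ≠ last_target
    · obtain ⟨rfl, hne⟩ := h0
      have hk : pvE "symptom duration" ("symptom duration" :: gs) last_target = true := by simp [pvE, hne]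
      rw [hk]
      rw [pvE_cons_of_not "measured temperature" _ _ _ (by rintro ⟨h', -⟩; exact absurd h' (by decide)),
          pvE_cons_of_not "red-flag symptoms" _ _ _ (by rintro ⟨h', -⟩; exact absurd h' (by decide)),
          pvE_cons_of_not "current medications" _ _ _ (by rintro ⟨h', -⟩; exact absurd h' (by decide)),
          pvE_cons_of_not "allergy information" _ _ _ (by rintro ⟨h', -⟩; exact absurd h' (by decide)),
          pvE_cons_of_not "past medical history" _ _ _ (by rintro ⟨h', -⟩; exact absurd h' (by decide)),
          pvE_cons_of_not "age or pregnancy status" _ _ _ (by rintro ⟨h', -⟩; exact absurd h' (by decide)),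
          pvE_cons_of_not "main symptom" _ _ _ (by rintro ⟨h', -⟩; exact absurd h' (by decide))]
      have hc : pvCand last_target "symptom duration" = some ("symptom duration", 0) := by
        unfold pvCand
        rw [show pvRank.get? "symptom duration" = some 0 from rfl]
        simp [hne]
      rw [hc]
      exact pvM0 _ _ _ _ _ _ _ _
    by_cases h1 : g = "measured temperature" ∧ g ≠ last_target
    · obtain ⟨rfl, hne⟩ := h1
      have hk : pvE "measured temperature" ("measured temperature" :: gs) last_target = true := by simp [pvE, hne]
      rw [hk]
      rw [pvE_cons_of_not "symptom duration" _ _ _ (by rintro ⟨h', -⟩; exact absurd h' (by decide)),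
          pvE_cons_of_not "red-flag symptoms" _ _ _ (by rintro ⟨h', -⟩; exact absurd h' (by decide)),
          pvE_cons_of_not "current medications" _ _ _ (by rintro ⟨h', -⟩; exact absurd h' (by decide)),
          pvE_cons_of_not "allergy information" _ _ _ (by rintro ⟨h', -⟩; exact absurd h' (by decide)),
          pvE_cons_of_not "past medical history" _ _ _ (by rintro ⟨h', -⟩; exact absurd h' (by decide)),
          pvE_cons_of_not "age or pregnancy status" _ _ _ (by rintro ⟨h', -⟩; exact absurd h' (by decide)),
          pvE_cons_of_not "main symptom" _ _ _ (by rintro ⟨h', -⟩; exact absurd h' (by decide))]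
      have hc : pvCand last_target "measured temperature" = some ("measured temperature", 1) := by
        unfold pvCand
        rw [show pvRank.get? "measured temperature" = some 1 from rfl]
        simp [hne]
      rw [hc]
      exact pvM1 _ _ _ _ _ _ _ _
    by_cases h2 : g = "red-flag symptoms" ∧ g ≠ last_target
    · obtain ⟨rfl, hne⟩ := h2
      have hk : pvE "red-flag symptoms" ("red-flag symptoms" :: gs) last_target = true := by simp [pvE, hne]
      rw [hk]
      rw [pvE_cons_of_not "symptom duration" _ _ _ (by rintro ⟨h', -⟩; exact absurd h' (by decide)),
          pvE_cons_of_not "measured temperature" _ _ _ (by rintro ⟨h', -⟩; exact absurd h' (by decide)),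
          pvE_cons_of_not "current medications" _ _ _ (by rintro ⟨h', -⟩; exact absurd h' (by decide)),
          pvE_cons_of_not "allergy information" _ _ _ (by rintro ⟨h', -⟩; exact absurd h' (by decide)),
          pvE_cons_of_not "past medical history" _ _ _ (by rintro ⟨h', -⟩; exact absurd h' (by decide)),
          pvE_cons_of_not "age or pregnancy status" _ _ _ (by rintro ⟨h', -⟩; exact absurd h' (by decide)),
          pvE_cons_of_not "main symptom" _ _ _ (by rintro ⟨h', -⟩; exact absurd h' (by decide))]
      have hc : pvCand last_target "red-flag symptoms" = some ("red-flag symptoms", 2) := by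
        unfold pvCand
        rw [show pvRank.get? "red-flag symptoms" = some 2 from rfl]
        simp [hne]
      rw [hc]
      exact pvM2 _ _ _ _ _ _ _ _
    by_cases h3 : g = "current medications" ∧ g ≠ last_target
    · obtain ⟨rfl, hne⟩ := h3
      have hk : pvE "current medications" ("current medications" :: gs) last_target = true := by simp [pvE, hne]
      rw [hk]
      rw [pvE_cons_of_not "symptom duration" _ _ _ (by rintro ⟨h', -⟩; exact absurd h' (by decide)),
          pvE_cons_of_not "measured temperature" _ _ _ (by rintro ⟨h', -⟩; exact absurd h' (by decide)),
          pvE_cons_of_not "red-flag symptoms" _ _ _ (by rintro ⟨h', -⟩; exact absurd h' (by decide)),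
          pvE_cons_of_not "allergy information" _ _ _ (by rintro ⟨h', -⟩; exact absurd h' (by decide)),
          pvE_cons_of_not "past medical history" _ _ _ (by rintro ⟨h', -⟩; exact absurd h' (by decide)),
          pvE_cons_of_not "age or pregnancy status" _ _ _ (by rintro ⟨h', -⟩; exact absurd h' (by decide)),
          pvE_cons_of_not "main symptom" _ _ _ (by rintro ⟨h', -⟩; exact absurd h' (by decide))]
      have hc : pvCand last_target "current medications" = some ("current medications", 3) := by
        unfold pvCand
        rw [show pvRank.get? "current medications" = some 3 from rfl]
        simp [hne]
      rw [hc]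
      exact pvM3 _ _ _ _ _ _ _ _
    by_cases h4 : g = "allergy information" ∧ g ≠ last_target
    · obtain ⟨rfl, hne⟩ := h4
      have hk : pvE "allergy information" ("allergy information" :: gs) last_target = true := by simp [pvE, hne]
      rw [hk]
      rw [pvE_cons_of_not "symptom duration" _ _ _ (by rintro ⟨h', -⟩; exact absurd h' (by decide)),
          pvE_cons_of_not "measured temperature" _ _ _ (by rintro ⟨h', -⟩; exact absurd h' (by decide)),
          pvE_cons_of_not "red-flag symptoms" _ _ _ (by rintro ⟨h', -⟩; exact absurd h' (by decide)),
          pvE_cons_of_not "current medications" _ _ _ (by rintro ⟨h', -⟩; exact absurd h' (by decide)),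
          pvE_cons_of_not "past medical history" _ _ _ (by rintro ⟨h', -⟩; exact absurd h' (by decide)),
          pvE_cons_of_not "age or pregnancy status" _ _ _ (by rintro ⟨h', -⟩; exact absurd h' (by decide)),
          pvE_cons_of_not "main symptom" _ _ _ (by rintro ⟨h', -⟩; exact absurd h' (by decide))]
      have hc : pvCand last_target "allergy information" = some ("allergy information", 4) := by
        unfold pvCand
        rw [show pvRank.get? "allergy information" = some 4 from rfl]
        simp [hne]
      rw [hc]
      exact pvM4 _ _ _ _ _ _ _ _
    by_cases h5 : g = "past medical history" ∧ g ≠ last_target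
    · obtain ⟨rfl, hne⟩ := h5
      have hk : pvE "past medical history" ("past medical history" :: gs) last_target = true := by simp [pvE, hne]
      rw [hk]
      rw [pvE_cons_of_not "symptom duration" _ _ _ (by rintro ⟨h', -⟩; exact absurd h' (by decide)),
          pvE_cons_of_not "measured temperature" _ _ _ (by rintro ⟨h', -⟩; exact absurd h' (by decide)),
          pvE_cons_of_not "red-flag symptoms" _ _ _ (by rintro ⟨h', -⟩; exact absurd h' (by decide)),
          pvE_cons_of_not "current medications" _ _ _ (by rintro ⟨h', -⟩; exact absurd h' (by decide)),
          pvE_cons_of_not "allergy information" _ _ _ (by rintro ⟨h', -⟩; exact absurd h' (by decide)),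
          pvE_cons_of_not "age or pregnancy status" _ _ _ (by rintro ⟨h', -⟩; exact absurd h' (by decide)),
          pvE_cons_of_not "main symptom" _ _ _ (by rintro ⟨h', -⟩; exact absurd h' (by decide))]
      have hc : pvCand last_target "past medical history" = some ("past medical history", 5) := by
        unfold pvCand
        rw [show pvRank.get? "past medical history" = some 5 from rfl]
        simp [hne]
      rw [hc]
      exact pvM5 _ _ _ _ _ _ _ _
    by_cases h6 : g = "age or pregnancy status" ∧ g ≠ last_target
    · obtain ⟨rfl, hne⟩ := h6
      have hk : pvE "age or pregnancy status" ("age or pregnancy status" :: gs) last_target = true := by simp [pvE, hne]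
      rw [hk]
      rw [pvE_cons_of_not "symptom duration" _ _ _ (by rintro ⟨h', -⟩; exact absurd h' (by decide)),
          pvE_cons_of_not "measured temperature" _ _ _ (by rintro ⟨h', -⟩; exact absurd h' (by decide)),
          pvE_cons_of_not "red-flag symptoms" _ _ _ (by rintro ⟨h', -⟩; exact absurd h' (by decide)),
          pvE_cons_of_not "current medications" _ _ _ (by rintro ⟨h', -⟩; exact absurd h' (by decide)),
          pvE_cons_of_not "allergy information" _ _ _ (by rintro ⟨h', -⟩; exact absurd h' (by decide)),
          pvE_cons_of_not "past medical history" _ _ _ (by rintro ⟨h', -⟩; exact absurd h' (by decide)),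
          pvE_cons_of_not "main symptom" _ _ _ (by rintro ⟨h', -⟩; exact absurd h' (by decide))]
      have hc : pvCand last_target "age or pregnancy status" = some ("age or pregnancy status", 6) := by
        unfold pvCand
        rw [show pvRank.get? "age or pregnancy status" = some 6 from rfl]
        simp [hne]
      rw [hc]
      exact pvM6 _ _ _ _ _ _ _ _
    by_cases h7 : g = "main symptom" ∧ g ≠ last_target
    · obtain ⟨rfl, hne⟩ := h7
      have hk : pvE "main symptom" ("main symptom" :: gs) last_target = true := by simp [pvE, hne]
      rw [hk]
      rw [pvE_cons_of_not "symptom duration" _ _ _ (by rintro ⟨h', -⟩; exact absurd h' (by decide)),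
          pvE_cons_of_not "measured temperature" _ _ _ (by rintro ⟨h', -⟩; exact absurd h' (by decide)),
          pvE_cons_of_not "red-flag symptoms" _ _ _ (by rintro ⟨h', -⟩; exact absurd h' (by decide)),
          pvE_cons_of_not "current medications" _ _ _ (by rintro ⟨h', -⟩; exact absurd h' (by decide)),
          pvE_cons_of_not "allergy information" _ _ _ (by rintro ⟨h', -⟩; exact absurd h' (by decide)),
          pvE_cons_of_not "past medical history" _ _ _ (by rintro ⟨h', -⟩; exact absurd h' (by decide)),
          pvE_cons_of_not "age or pregnancy status" _ _ _ (by rintro ⟨h', -⟩; exact absurd h' (by decide))]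
      have hc : pvCand last_target "main symptom" = some ("main symptom", 7) := by
        unfold pvCand
        rw [show pvRank.get? "main symptom" = some 7 from rfl]
        simp [hne]
      rw [hc]
      exact pvM7 _ _ _ _ _ _ _ _
    · have hc : pvCand last_target g = none := by
        by_cases hl : g = last_target
        · unfold pvCand; cases pvRank.get? g <;> simp [hl]
        · have e0 : g ≠ "symptom duration" := fun e => h0 ⟨e, hl⟩
          have e1 : g ≠ "measured temperature" := fun e => h1 ⟨e, hl⟩
          have e2 : g ≠ "red-flag symptoms" := fun e => h2 ⟨e, hl⟩
          have e3 : g ≠ "current medications" := fun e => h3 ⟨e, hl⟩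
          have e4 : g ≠ "allergy information" := fun e => h4 ⟨e, hl⟩
          have e5 : g ≠ "past medical history" := fun e => h5 ⟨e, hl⟩
          have e6 : g ≠ "age or pregnancy status" := fun e => h6 ⟨e, hl⟩
          have e7 : g ≠ "main symptom" := fun e => h7 ⟨e, hl⟩
          unfold pvCand
          rw [pvRank_get_none g e0 e1 e2 e3 e4 e5 e6 e7]
      rw [hc, pvMerge_none_left,
          pvE_cons_of_not "symptom duration" _ _ _ h0,
          pvE_cons_of_not "measured temperature" _ _ _ h1,
          pvE_cons_of_not "red-flag symptoms" _ _ _ h2,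
          pvE_cons_of_not "current medications" _ _ _ h3,
          pvE_cons_of_not "allergy information" _ _ _ h4,
          pvE_cons_of_not "past medical history" _ _ _ h5,
          pvE_cons_of_not "age or pregnancy status" _ _ _ h6,
          pvE_cons_of_not "main symptom" _ _ _ h7]

theorem pvFindA_eq_exp (gaps : List String) (last_target : String) :
    pvFindA gaps last_target pvPriorities =
      (pvExp8 (pvE "symptom duration" gaps last_target) (pvE "measured temperature" gaps last_target) (pvE "red-flag symptoms" gaps last_target) (pvE "current medications" gaps last_target) (pvE "allergy information" gaps last_target) (pvE "past medical history" gaps last_target) (pvE "age or pregnancy status" gaps last_target) (pvE "main symptom" gaps last_target)).map Prod.fst := by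
  by_cases h0 : "symptom duration" ∈ gaps ∧ "symptom duration" ≠ last_target
  · simp [pvFindA, pvPriorities, pvExp8, pvE, h0]
  by_cases h1 : "measured temperature" ∈ gaps ∧ "measured temperature" ≠ last_target
  · simp [pvFindA, pvPriorities, pvExp8, pvE, h0, h1]
  by_cases h2 : "red-flag symptoms" ∈ gaps ∧ "red-flag symptoms" ≠ last_target
  · simp [pvFindA, pvPriorities, pvExp8, pvE, h0, h1, h2]
  by_cases h3 : "current medications" ∈ gaps ∧ "current medications" ≠ last_target
  · simp [pvFindA, pvPriorities, pvExp8, pvE, h0, h1, h2, h3]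
  by_cases h4 : "allergy information" ∈ gaps ∧ "allergy information" ≠ last_target
  · simp [pvFindA, pvPriorities, pvExp8, pvE, h0, h1, h2, h3, h4]
  by_cases h5 : "past medical history" ∈ gaps ∧ "past medical history" ≠ last_target
  · simp [pvFindA, pvPriorities, pvExp8, pvE, h0, h1, h2, h3, h4, h5]
  by_cases h6 : "age or pregnancy status" ∈ gaps ∧ "age or pregnancy status" ≠ last_target
  · simp [pvFindA, pvPriorities, pvExp8, pvE, h0, h1, h2, h3, h4, h5, h6]
  by_cases h7 : "main symptom" ∈ gaps ∧ "main symptom" ≠ last_target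
  · simp [pvFindA, pvPriorities, pvExp8, pvE, h0, h1, h2, h3, h4, h5, h6, h7]
  simp [pvFindA, pvPriorities, pvExp8, pvE, h0, h1, h2, h3, h4, h5, h6, h7]

-- ===== VERDICT (by name: the statement is the Claim_ definition above) =====
theorem choose_next_question_target_spec : Claim_equal_choose_next_question_target := by
  unfold Claim_equal_choose_next_question_target
  intro gaps last_target _
  unfold Spec_choose_next_question_target
  cases gaps with
  | nil => rfl
  | cons g0 gs =>
    unfold choose_next_question_target choose_next_question_target_alt
    rw [pvFoldl_eq_big, pvMerge_none_left, pvBig_eq_exp, pvFindA_eq_exp]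
    cases pvExp8 (pvE "symptom duration" (g0 :: gs) last_target) (pvE "measured temperature" (g0 :: gs) last_target) (pvE "red-flag symptoms" (g0 :: gs) last_target) (pvE "current medications" (g0 :: gs) last_target) (pvE "allergy information" (g0 :: gs) last_target) (pvE "past medical history" (g0 :: gs) last_target) (pvE "age or pregnancy status" (g0 :: gs) last_target) (pvE "main symptom" (g0 :: gs) last_target) with
    | none => rfl
    | some a => rfl
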